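-- pv_equiv track=rewrite | github.com/shengkaisun/python_flask_repo | flask_basics/example/template_exercise.py | run_check
-- ===== SOURCE A (Python) =====
-- def run_check(name):
--     results = {"upper":False, "lower":False, "num":False}
--     for c in name:
--         if c.islower():
--             results['lower'] = True
--         elif c.isupper():
--             results['upper'] = True
--         elif c.isdigit():
--             results['num'] = True
--
--     return results
-- ===== SOURCE B (Python) =====
-- def run_check(name):
--     return {
--         "upper": any(c.isupper() for c in name),
--         "lower": any(c.islower() for c in name),
--         "num": any(c.isdigit() for c in name),
--     }
-- ===== Notes on version B (the rewrite author's own statement) =====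
-- stated objective: idiomatic
-- what changed: Replaces the single stateful loop with dict mutation by three independent any() presence scans, one per character class, assembling the dict directly; correct because the three classes are disjoint.
import Mathlib
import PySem

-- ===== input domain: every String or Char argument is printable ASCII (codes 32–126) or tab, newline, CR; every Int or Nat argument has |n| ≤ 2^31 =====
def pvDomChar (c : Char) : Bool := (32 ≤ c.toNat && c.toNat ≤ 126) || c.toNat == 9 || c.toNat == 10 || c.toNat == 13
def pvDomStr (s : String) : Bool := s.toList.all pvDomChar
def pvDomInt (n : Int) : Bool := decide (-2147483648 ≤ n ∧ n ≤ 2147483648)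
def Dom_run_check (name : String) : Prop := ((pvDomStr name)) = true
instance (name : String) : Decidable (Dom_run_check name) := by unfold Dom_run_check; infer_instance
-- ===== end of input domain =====

-- B replaces A's single stateful loop over a mutable dict with three independent any-scans, one per character class (idiomatic).
-- ===== PORT A =====
def pvStepA (d : PySem.Dict String Bool) (c : Char) : PySem.Dict String Bool :=
  if PySem.Chars.islower c then d.insert "lower" true
  else if PySem.Chars.isupper c then d.insert "upper" true
  else if PySem.Chars.isdigit c then d.insert "num" true
  else d

def run_check (name : String) : List (String × Bool) :=
  let results : PySem.Dict String Bool :=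
    PySem.Dict.ofList [("upper", false), ("lower", false), ("num", false)]
  (name.toList.foldl pvStepA results).items

-- ===== PORT B =====
def run_check_alt (name : String) : List (String × Bool) :=
  [("upper", name.toList.any PySem.Chars.isupper),
   ("lower", name.toList.any PySem.Chars.islower),
   ("num",   name.toList.any PySem.Chars.isdigit)]

-- ===== PRECONDITION & SPEC =====
def Spec_run_check (name : String) (out : List (String × Bool)) : Prop := out = run_check_alt name
instance (name : String) (out : List (String × Bool)) : Decidable (Spec_run_check name out) := by unfold Spec_run_check; infer_instance

-- ===== CLAIM (what is proved, stated in full; the proofs are below) =====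
def Claim_equal_run_check : Prop := ∀ (name : String), Dom_run_check name → Spec_run_check name (run_check name)

-- ===== LEMMAS AND PROOFS =====
theorem pvStepA_eq (u lo n : Bool) (c : Char) :
    pvStepA (PySem.Dict.mk [("upper", u), ("lower", lo), ("num", n)]) c
      = PySem.Dict.mk [("upper", u || PySem.Chars.isupper c),
                       ("lower", lo || PySem.Chars.islower c),
                       ("num", n || PySem.Chars.isdigit c)] := by
  by_cases hl : PySem.Chars.islower c
  · have h1 : PySem.Chars.isupper c = false := by
      simp [PySem.Chars.islower, Char.le_def, UInt32.le_iff_toNat_le] at hl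
      simp [PySem.Chars.isupper, Char.le_def, UInt32.le_iff_toNat_le]; omega
    have h2 : PySem.Chars.isdigit c = false := by
      simp [PySem.Chars.islower, Char.le_def, UInt32.le_iff_toNat_le] at hl
      simp [PySem.Chars.isdigit, Char.le_def, UInt32.le_iff_toNat_le]; omega
    simp [pvStepA, hl, h1, h2, PySem.Dict.insert, PySem.Dict.contains]
  · by_cases hu : PySem.Chars.isupper c
    · have h2 : PySem.Chars.isdigit c = false := by
        simp [PySem.Chars.isupper, Char.le_def, UInt32.le_iff_toNat_le] at hu
        simp [PySem.Chars.isdigit, Char.le_def, UInt32.le_iff_toNat_le]; omega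
      simp [pvStepA, hl, hu, h2, PySem.Dict.insert, PySem.Dict.contains]
    · by_cases hd : PySem.Chars.isdigit c
      · simp [pvStepA, hl, hu, hd, PySem.Dict.insert, PySem.Dict.contains]
      · simp [pvStepA, hl, hu, hd]

theorem pvLoopA (l : List Char) (u lo n : Bool) :
    l.foldl pvStepA (PySem.Dict.mk [("upper", u), ("lower", lo), ("num", n)])
      = PySem.Dict.mk [("upper", u || l.any PySem.Chars.isupper),
                       ("lower", lo || l.any PySem.Chars.islower),
                       ("num", n || l.any PySem.Chars.isdigit)] := by
  induction l generalizing u lo n with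
  | nil => simp
  | cons c t ih =>
      simp only [List.foldl_cons, pvStepA_eq, ih, List.any_cons, Bool.or_assoc]

-- ===== VERDICT (by name: the statement is the Claim_ definition above) =====
theorem run_check_spec : Claim_equal_run_check := by
  intro name _
  unfold Spec_run_check run_check run_check_alt
  have h : PySem.Dict.ofList [("upper", false), ("lower", false), ("num", false)]
      = PySem.Dict.mk [("upper", false), ("lower", false), ("num", false)] := by decide
  simp [h, pvLoopA]
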